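-- pv_equiv track=rewrite | github.com/SanyogitaPiya/LLM4TDD | RQ5/test/code1191.py | code1191
-- ===== SOURCE A (Python) =====
-- from typing import List
--
-- def code1191(arr: List[int], k: int) -> int:
--     n = len(arr)
--
--     # Handle the case when the input list has only one element
--     if n == 1:
--         return max(arr[0], k)
--
--     max_sum = float('-inf')
--
--     for i in range(n - k + 1):
--         current_sum = sum(arr[i:i+k])
--         max_sum = max(max_sum, current_sum)
--
--     # Return the maximum of max_sum and k
--     return max(max_sum, k)
-- ===== SOURCE B (Python) =====
-- def code1191(arr, k):
--     n = len(arr)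
--     if n == 1:
--         return max(arr[0], k)
--     if k > n:
--         return k  # no window of size k fits
--     window = sum(arr[:k])
--     best = window
--     for i in range(k, n):
--         window += arr[i] - arr[i - k]
--         if window > best:
--             best = window
--     return max(best, k)
-- ===== Notes on version B (the rewrite author's own statement) =====
-- stated objective: faster
-- what changed: B keeps one running window sum updated by adding the entering element and subtracting the leaving one (O(n) one pass) instead of re-summing each window slice (O(n*k)); Pre_ excludes negative window sizes k < 0 on lists of length != 1, where A's slice arr[i:i+k] wraps via the negative stop into an accidental sublist sum while B's window loop raises IndexError.
-- outside the precondition, e.g. on code1191([3, 1], -1): A returns 3, B raises IndexError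
import Mathlib
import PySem

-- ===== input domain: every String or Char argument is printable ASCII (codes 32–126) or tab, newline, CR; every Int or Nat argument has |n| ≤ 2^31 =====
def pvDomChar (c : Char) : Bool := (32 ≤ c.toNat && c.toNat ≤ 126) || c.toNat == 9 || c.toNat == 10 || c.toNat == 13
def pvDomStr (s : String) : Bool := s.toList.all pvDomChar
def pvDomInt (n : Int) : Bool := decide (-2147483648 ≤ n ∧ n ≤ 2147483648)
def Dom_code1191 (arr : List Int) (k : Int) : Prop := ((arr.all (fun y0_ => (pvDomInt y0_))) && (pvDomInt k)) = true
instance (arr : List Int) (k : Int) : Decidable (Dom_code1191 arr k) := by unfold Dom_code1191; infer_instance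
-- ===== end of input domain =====

-- B replaces A's per-window re-summation sum(arr[i:i+k]) by one running window sum updated
-- incrementally (add entering, subtract leaving element): O(n) instead of O(n*k) (objective: faster).


-- ===== PORT A =====
-- literal port of A: max_sum starts as float('-inf'), modelled as `none`;
-- `max(float('-inf'), x) = x` and the final `max(-inf, k) = k` are the `none` branches.
def code1191 (arr : List Int) (k : Int) : Int :=
  let n : Int := arr.length
  if n == 1 then
    max (PySem.List.pyGetD arr 0 0) k
  else
    let maxSum : Option Int :=
      (PySem.List.pyRange 0 (n - k + 1) 1).foldl
        (fun ms i =>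
          let currentSum := (PySem.List.slice arr (some i) (some (i + k))).sum
          some (match ms with
                | none => currentSum
                | some m => max m currentSum)) none
    match maxSum with
    | none => k
    | some m => max m k

-- ===== PORT B =====
-- port of Source B: running window sum, updated in one pass
def code1191_alt (arr : List Int) (k : Int) : Int :=
  let n : Int := arr.length
  if n == 1 then
    max (PySem.List.pyGetD arr 0 0) k
  else if k > n then
    k
  else
  let window := (PySem.List.slice arr none (some k)).sum
  let wb :=
    (PySem.List.pyRange k (arr.length : Int) 1).foldl
      (fun wb i =>
        let w := wb.1 + PySem.List.pyGetD arr i 0 - PySem.List.pyGetD arr (i - k) 0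
        (w, if w > wb.2 then w else wb.2)) (window, window)
  max wb.2 k

-- ===== PRECONDITION & SPEC =====
-- Pre_ excludes negative window sizes k < 0 on lists of length ≠ 1: there A's slice arr[i:i+k]
-- wraps via the negative stop (an accidental nonempty sublist sum) while B's natural window loop
-- indexes out of range and raises IndexError.
def Pre_code1191 (arr : List Int) (k : Int) : Prop := 0 ≤ k ∨ arr.length = 1
instance (arr : List Int) (k : Int) : Decidable (Pre_code1191 arr k) := by unfold Pre_code1191; infer_instance
def pvWitness_code1191 : List Int × Int := ([1, 2, 3], 2)

def Spec_code1191 (arr : List Int) (k : Int) (out : Int) : Prop := out = code1191_alt arr k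
instance (arr : List Int) (k : Int) (out : Int) : Decidable (Spec_code1191 arr k out) := by unfold Spec_code1191; infer_instance

-- ===== CLAIM (what is proved, stated in full; the proofs are below) =====
def Claim_equal_code1191 : Prop := ∀ (arr : List Int) (k : Int), Dom_code1191 arr k → Pre_code1191 arr k → Spec_code1191 arr k (code1191 arr k)

-- ===== LEMMAS AND PROOFS =====

-- sum of the window of size K starting at j
def pvW (arr : List Int) (K j : Nat) : Int := ((arr.drop j).take K).sum

-- max of the window sums at positions 0..j
def pvF (arr : List Int) (K : Nat) : Nat → Int
  | 0 => pvW arr K 0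
  | j + 1 => max (pvF arr K j) (pvW arr K (j + 1))

theorem take_sum_split (arr : List Int) (K j : Nat) :
    (arr.take (j + K)).sum = (arr.take j).sum + pvW arr K j := by
  rw [List.take_add, List.sum_append, pvW]

theorem take_succ_sum (arr : List Int) (t : Nat) (ht : t < arr.length) :
    (arr.take (t + 1)).sum = (arr.take t).sum + arr.getD t 0 := by
  rw [List.take_add_one, List.sum_append, List.getD_eq_getElem arr 0 ht]
  simp [List.getElem?_eq_getElem ht]

theorem pvW_step (arr : List Int) (K j : Nat) (h : j + K < arr.length) :
    pvW arr K (j + 1) = pvW arr K j + arr.getD (j + K) 0 - arr.getD j 0 := by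
  have h1 := take_sum_split arr K j
  have h2 := take_sum_split arr K (j + 1)
  have h3 := take_succ_sum arr (j + K) h
  have h4 := take_succ_sum arr j (by omega)
  have e : j + 1 + K = (j + K) + 1 := by omega
  rw [e] at h2
  omega

theorem foldA (arr : List Int) (k : Int) (K : Nat) (hk : k = (K : Int)) : ∀ (m : Nat),
    (PySem.List.pyRange 0 ((m : Int) + 1) 1).foldl
      (fun ms i =>
        let currentSum := (PySem.List.slice arr (some i) (some (i + k))).sum
        some (match ms with
              | none => currentSum
              | some m => max m currentSum)) none
    = some (pvF arr K m) := by
  intro m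
  induction m with
  | zero =>
    rw [show ((0 : Nat) : Int) + 1 = 0 + 1 by norm_num, PySem.List.pyRange_one_singleton]
    simp only [List.foldl_cons, List.foldl_nil, hk]
    rw [show ((0 : Int) + (K : Int)) = ((0 + K : Nat) : Int) by push_cast; ring]
    rw [show ((0 : Int)) = ((0 : Nat) : Int) by norm_num, PySem.List.slice_natCast]
    simp [pvF, pvW]
  | succ m ih =>
    rw [show ((m + 1 : Nat) : Int) + 1 = ((m : Int) + 1) + 1 by push_cast; ring,
        PySem.List.pyRange_one_succ_right (by positivity)]
    rw [List.foldl_append, ih]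
    simp only [List.foldl_cons, List.foldl_nil, hk]
    rw [show ((m : Int) + 1) = ((m + 1 : Nat) : Int) by push_cast; ring]
    rw [show (((m + 1 : Nat) : Int) + (K : Int)) = (((m + 1) + K : Nat) : Int) by push_cast; ring,
        PySem.List.slice_natCast]
    simp only [Option.some.injEq]
    have : ((m + 1) + K) - (m + 1) = K := by omega
    rw [this, pvF]
    rfl

theorem foldB (arr : List Int) (k : Int) (K : Nat) (hk : k = (K : Int)) : ∀ (m : Nat),
    m + K ≤ arr.length →
    (PySem.List.pyRange k (k + (m : Int)) 1).foldl
      (fun wb i =>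
        let w := wb.1 + PySem.List.pyGetD arr i 0 - PySem.List.pyGetD arr (i - k) 0
        (w, if w > wb.2 then w else wb.2)) (pvW arr K 0, pvW arr K 0)
    = (pvW arr K m, pvF arr K m) := by
  intro m
  induction m with
  | zero =>
    intro _
    rw [show (k + ((0 : Nat) : Int)) = k by push_cast; ring,
        PySem.List.pyRange_one_eq_nil le_rfl]
    simp [pvF]
  | succ m ih =>
    intro hm
    rw [show (k + ((m + 1 : Nat) : Int)) = (k + (m : Int)) + 1 by push_cast; ring,
        PySem.List.pyRange_one_succ_right (by omega),
        List.foldl_append, ih (by omega)]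
    simp only [List.foldl_cons, List.foldl_nil]
    have e1 : (k + (m : Int)) = ((K + m : Nat) : Int) := by rw [hk]; push_cast; ring
    have e2 : (k + (m : Int)) - k = ((m : Nat) : Int) := by ring
    rw [e1, PySem.List.pyGetD_natCast, ← e1, e2, PySem.List.pyGetD_natCast]
    have hW := pvW_step arr K m (by omega)
    have eadd : m + K = K + m := by omega
    rw [eadd] at hW
    simp only [Prod.mk.injEq]
    constructor
    · omega
    · rw [pvF]
      have : pvW arr K (m + 1) = pvW arr K m + arr.getD (K + m) 0 - arr.getD m 0 := hW
      rw [← this]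
      split_ifs with h <;> omega

-- ===== VERDICT (by name: the statement is the Claim_ definition above) =====
theorem code1191_spec : Claim_equal_code1191 := by
  intro arr k _ hpre
  show code1191 arr k = code1191_alt arr k
  unfold code1191 code1191_alt
  by_cases hn : ((arr.length : Int) == 1) = true
  · simp only [hn, if_true]
  · have hlen1 : arr.length ≠ 1 := by
      intro h
      rw [h] at hn
      exact hn rfl
    have h0 : 0 ≤ k := hpre.resolve_right hlen1
    simp only [hn, Bool.false_eq_true, if_false]
    by_cases hk0 : k = 0
    · -- k = 0: every slice arr[i:i+0] is empty; every window update adds and subtracts arr[i]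
      subst hk0
      have hslice : ∀ i : Int, (PySem.List.slice arr (some i) (some (i + 0))).sum = 0 := by
        intro i
        have hl0 : (PySem.List.slice arr (some i) (some (i + 0))).length = 0 := by
          rw [PySem.List.length_slice, add_zero]
          omega
        rw [List.length_eq_zero_iff.mp hl0]
        rfl
      have hslice' : ∀ i : Int, (PySem.List.slice arr (some i) (some i)).sum = 0 := by
        intro i
        simpa using hslice i
      have hA : ∀ (l : List Int),
          l.foldl (fun ms i =>
            let currentSum := (PySem.List.slice arr (some i) (some (i + 0))).sum
            some (match ms with
                  | none => currentSum
                  | some m => max m currentSum)) (some 0) = some 0 := by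
        intro l
        induction l with
        | nil => rfl
        | cons x xs ih => simpa [hslice' x] using ih
      have hB : ∀ (l : List Int),
          l.foldl (fun wb i =>
            let w := wb.1 + PySem.List.pyGetD arr i 0 - PySem.List.pyGetD arr (i - 0) 0
            (w, if w > wb.2 then w else wb.2)) ((0 : Int), (0 : Int)) = (0, 0) := by
        intro l
        induction l with
        | nil => rfl
        | cons x xs ih =>
          have hz : (0 : Int) + PySem.List.pyGetD arr x 0 - PySem.List.pyGetD arr x 0 = 0 := by
            ring
          simpa [hz] using ih
      rw [if_neg (by omega : ¬ (0 : Int) > (arr.length : Int))]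
      have hr : (arr.length : Int) - 0 + 1 = 0 + ((arr.length : Int) + 1) := by ring
      rw [hr, PySem.List.pyRange_one_cons (by omega)]
      have hw0 : (PySem.List.slice arr none (some 0)).sum = 0 := by
        rw [show (0 : Int) = ((0 : Nat) : Int) from rfl, PySem.List.slice_to_natCast]
        simp
      simp only [List.foldl_cons, hslice 0, hw0, hA, hB]
    · have h1 : 1 ≤ k := by omega
      by_cases hkn : k > (arr.length : Int)
      · rw [if_pos hkn, PySem.List.pyRange_one_eq_nil (by omega)]
        simp
      · rw [if_neg hkn]
        have h2 : k ≤ (arr.length : Int) := by omega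
        set K := k.toNat with hK
        have hk : k = (K : Int) := (Int.toNat_of_nonneg (by omega)).symm
        have hKn : K ≤ arr.length := by omega
        have hw0 : (PySem.List.slice arr none (some k)).sum = pvW arr K 0 := by
          rw [hk, PySem.List.slice_to_natCast]
          simp [pvW]
        have hm : (arr.length : Int) - k + 1 = ((arr.length - K : Nat) : Int) + 1 := by
          rw [hk]; push_cast [Nat.cast_sub hKn]; ring
        rw [hm, foldA arr k K hk (arr.length - K)]
        have hn2 : (arr.length : Int) = k + ((arr.length - K : Nat) : Int) := by
          rw [hk]; push_cast [Nat.cast_sub hKn]; ring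
        rw [hw0, hn2, foldB arr k K hk (arr.length - K) (by omega)]
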